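-- pv_equiv track=rewrite | github.com/rayah97/python_homeworks | string_functions.py | replace_string
-- ===== SOURCE A (Python) =====
-- def replace_string(string, old, new):
--     result = ""
--     n = len(old)
--     i = 0
--     while i < len(string):
--         if string[i:i+n] == old:
--             result += new
--             i += n
--         else:
--             result += string[i]
--             i += 1
--     return result
-- ===== SOURCE B (Python) =====
-- def replace_string(string, old, new):
--     return string.replace(old, new)
-- ===== Notes on version B (the rewrite author's own statement) =====
-- stated objective: idiomatic
-- what changed: A's hand-written index loop that re-slices and compares old at every position is replaced by the standard library str.replace, the way any Python developer writes this.
-- outside the precondition, e.g. on replace_string('', '', 'x'): A returns '', B returns 'x'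
import Mathlib
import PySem

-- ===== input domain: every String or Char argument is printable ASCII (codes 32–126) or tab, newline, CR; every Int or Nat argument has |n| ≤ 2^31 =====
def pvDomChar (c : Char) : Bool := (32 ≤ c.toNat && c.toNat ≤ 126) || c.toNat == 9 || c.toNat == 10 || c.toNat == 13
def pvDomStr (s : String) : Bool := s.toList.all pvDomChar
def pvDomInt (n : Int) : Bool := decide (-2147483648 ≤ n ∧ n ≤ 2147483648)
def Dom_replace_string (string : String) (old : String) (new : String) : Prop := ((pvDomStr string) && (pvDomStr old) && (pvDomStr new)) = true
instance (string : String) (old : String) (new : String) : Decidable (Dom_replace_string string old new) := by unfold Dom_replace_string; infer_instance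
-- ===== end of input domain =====

-- B replaces A's hand-written index loop with the idiomatic str.replace; equivalence is about the return value.

-- ===== PORT A =====
-- while loop ported as fuel recursion on the index i; fuel = len(string) suffices since
-- (for old ≠ "") i strictly increases each iteration. string[i:i+n] with 0 ≤ i ≤ len
-- is exactly (s.drop i).take n; 'result += …' keeps result as a List Char accumulator
-- (String concatenation done on List Char, converted once at the end — exact).
def rsGo (s old new : List Char) (fuel : Nat) (i : Nat) (result : List Char) : List Char :=
  match fuel with
  | 0 => result
  | fuel + 1 =>
    if i < s.length then
      if (s.drop i).take old.length = old then
        rsGo s old new fuel (i + old.length) (result ++ new)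
      else
        rsGo s old new fuel (i + 1) (result ++ (s.drop i).take 1)
    else result

def replace_string (string : String) (old : String) (new : String) : String :=
  String.ofList (rsGo string.toList old.toList new.toList string.toList.length 0 [])

-- ===== PORT B =====
def replace_string_alt (string : String) (old : String) (new : String) : String :=
  PySem.Str.replace string old new

-- ===== PRECONDITION & SPEC =====
-- Pre_ excludes old = "": there A diverges (infinite while loop) for every nonempty string,
-- and for string = "" A's accidental value "" differs from Python's str.replace, which inserts new.
def Pre_replace_string (string : String) (old : String) (new : String) : Prop := old ≠ ""
instance (string : String) (old : String) (new : String) : Decidable (Pre_replace_string string old new) := by unfold Pre_replace_string; infer_instance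

def pvWitness_replace_string : String × String × String := ("ababa", "aba", "X")

def Spec_replace_string (string : String) (old : String) (new : String) (out : String) : Prop := out = replace_string_alt string old new
instance (string : String) (old : String) (new : String) (out : String) : Decidable (Spec_replace_string string old new out) := by unfold Spec_replace_string; infer_instance

-- ===== CLAIM (what is proved, stated in full; the proofs are below) =====
def Claim_equal_replace_string : Prop := ∀ (string : String) (old : String) (new : String), Dom_replace_string string old new → Pre_replace_string string old new → Spec_replace_string string old new (replace_string string old new)

-- ===== LEMMAS AND PROOFS =====

-- accumulator-out lemma for A's loop
theorem rsGo_acc (s old new : List Char) (fuel i : Nat) (acc : List Char) :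
    rsGo s old new fuel i acc = acc ++ rsGo s old new fuel i [] := by
  induction fuel generalizing i acc with
  | zero => simp [rsGo]
  | succ n ih =>
    simp only [rsGo]
    split_ifs with h1 h2
    · rw [ih _ (acc ++ new), ih _ ([] ++ new)]; simp
    · rw [ih _ (acc ++ _), ih _ ([] ++ _)]; simp
    · simp

-- accumulator-out lemma for PySem's replace loop
theorem repGo_acc (old new : List Char) (fuel : Nat) (l acc : List Char) :
    PySem.Chars.replace.go old new fuel l acc = acc.reverse ++ PySem.Chars.replace.go old new fuel l [] := by
  induction fuel generalizing l acc with
  | zero => simp [PySem.Chars.replace.go]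
  | succ n ih =>
    cases l with
    | nil => simp [PySem.Chars.replace.go]
    | cons c t =>
      simp only [PySem.Chars.replace.go]
      split_ifs with h
      · rw [ih _ (new.reverse ++ acc), ih _ (new.reverse ++ [])]; simp
      · rw [ih _ (c :: acc), ih _ [c]]; simp

-- core correspondence: A's indexed loop equals PySem's suffix loop, given enough fuel
theorem rsGo_eq_repGo (s old new : List Char) (hold : old ≠ []) :
    ∀ (fuel i : Nat), s.length - i ≤ fuel →
      rsGo s old new fuel i [] = PySem.Chars.replace.go old new fuel (s.drop i) [] := by
  intro fuel
  induction fuel with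
  | zero =>
    intro i hi
    have : s.drop i = [] := List.drop_eq_nil_of_le (by omega)
    simp [rsGo, PySem.Chars.replace.go, this]
  | succ n ih =>
    intro i hi
    by_cases hlt : i < s.length
    · have hne : s.drop i ≠ [] := by
        simp [List.drop_eq_nil_iff]; omega
      obtain ⟨c, t, hct⟩ := List.exists_cons_of_ne_nil hne
      have hpref : ((s.drop i).take old.length = old) ↔ (old.isPrefixOf (s.drop i) = true) := by
        rw [List.isPrefixOf_iff_prefix, List.prefix_iff_eq_take]
        constructor <;> intro h <;> exact h.symm
      simp only [rsGo, PySem.Chars.replace.go, hct, if_pos hlt]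
      rw [← hct]
      by_cases hp : (s.drop i).take old.length = old
      · rw [if_pos hp, if_pos (hpref.mp hp)]
        have hol : 1 ≤ old.length := by
          cases old with
          | nil => exact absurd rfl hold
          | cons _ _ => simp
        rw [rsGo_acc, repGo_acc, ih (i + old.length) (by omega), List.drop_drop]
        simp only [List.nil_append, List.append_nil, List.reverse_reverse]
      · rw [if_neg hp, if_neg (by rw [← hpref]; exact hp)]
        have ht : t = s.drop (i + 1) := by
          have := congrArg List.tail hct
          simpa [List.tail_drop] using this.symm
        rw [rsGo_acc, repGo_acc, ih (i + 1) (by omega), ← ht]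
        have hc1 : (s.drop i).take 1 = [c] := by rw [hct]; rfl
        simp [hc1]
    · have : s.drop i = [] := List.drop_eq_nil_of_le (by omega)
      simp [rsGo, PySem.Chars.replace.go, hlt, this]

-- ===== VERDICT (by name: the statement is the Claim_ definition above) =====
theorem replace_string_spec : Claim_equal_replace_string := by
  intro s old new _ hpre
  unfold Spec_replace_string replace_string replace_string_alt PySem.Str.replace PySem.Chars.replace
  have hold : old.toList ≠ [] := by
    intro h
    exact hpre (by simpa using congrArg String.ofList h)
  rw [if_neg (by simp [List.isEmpty_iff, hold])]
  congr 1
  rw [rsGo_eq_repGo s.toList old.toList new.toList hold s.toList.length 0 (by omega)]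
  simp
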